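-- pv_equiv track=rewrite | github.com/luisalvacelis/backend-transcription-analysis | app/routers/campaigns_router.py | _basename_without_extension
-- ===== SOURCE A (Python) =====
-- def _basename_without_extension(audio_name: str | None) -> str:
--     raw = (audio_name or '').strip()
--     if not raw:
--         return ''
--     for suffix in ('.mp3', '.wav', '.ogg', '.ogm', '.m4a'):
--         if raw.lower().endswith(suffix):
--             return raw[: -len(suffix)]
--     return raw
-- ===== SOURCE B (Python) =====
-- _AUDIO_EXTS = ('mp3', 'wav', 'ogg', 'ogm', 'm4a')
--
--
-- def _basename_without_extension(audio_name):
--     raw = (audio_name or '').strip()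
--     stem, dot, ext = raw.rpartition('.')
--     if dot and ext.lower() in _AUDIO_EXTS:
--         return stem
--     return raw
-- ===== Notes on version B (the rewrite author's own statement) =====
-- stated objective: alternative
-- what changed: Instead of testing each of the five suffixes with lower().endswith in a loop, B splits the name once at its last dot via rpartition and checks the lowercased extension against a set of known extensions.
import Mathlib
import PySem

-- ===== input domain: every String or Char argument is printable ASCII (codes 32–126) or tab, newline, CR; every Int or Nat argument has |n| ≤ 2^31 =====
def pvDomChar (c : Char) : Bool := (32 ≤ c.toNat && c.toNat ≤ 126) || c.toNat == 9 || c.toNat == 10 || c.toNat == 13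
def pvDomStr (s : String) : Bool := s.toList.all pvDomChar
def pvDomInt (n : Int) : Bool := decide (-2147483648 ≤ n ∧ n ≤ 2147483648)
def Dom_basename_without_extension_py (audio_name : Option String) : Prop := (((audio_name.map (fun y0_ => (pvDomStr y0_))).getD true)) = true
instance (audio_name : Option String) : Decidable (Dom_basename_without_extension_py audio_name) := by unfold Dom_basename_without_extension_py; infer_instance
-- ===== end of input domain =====

-- ===== PORT A =====
-- B replaces A's five lower().endswith suffix tests by one rpartition at the last dot
-- plus a set-membership test on the lowercased extension (alternative decomposition).
def pyExtLoop (raw : String) : List String → String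
  | [] => raw
  | sfx :: rest =>
    if PySem.Str.endswith (PySem.Str.lower raw) sfx then
      PySem.Str.slice raw none (some (-(sfx.length : Int)))
    else pyExtLoop raw rest

def basename_without_extension_py (audio_name : Option String) : String :=
  let raw := PySem.Str.strip (audio_name.getD "")
  if raw = "" then ""
  else pyExtLoop raw [".mp3", ".wav", ".ogg", ".ogm", ".m4a"]

-- ===== PORT B =====
-- hand port of str.rpartition(sep) for a single-char sep, exact: splits at the LAST
-- occurrence of sep (found by a span on the reversed list); returns (head, found?, tail).
def pyRPartitionDot (s : List Char) : List Char × Bool × List Char :=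
  match s.reverse.span (fun c => !(c == '.')) with
  | (_, []) => ([], false, s)
  | (t, _ :: u) => (u.reverse, true, t.reverse)

def pyAudioExts : List (List Char) :=
  [['m','p','3'], ['w','a','v'], ['o','g','g'], ['o','g','m'], ['m','4','a']]

def basename_without_extension_py_alt (audio_name : Option String) : String :=
  let raw := PySem.Str.strip (audio_name.getD "")
  match pyRPartitionDot raw.toList with
  | (stem, dot, ext) =>
    if dot = true ∧ PySem.Chars.lower ext ∈ pyAudioExts then String.ofList stem else raw

-- ===== PRECONDITION & SPEC =====
def Spec_basename_without_extension_py (audio_name : Option String) (out : String) : Prop := out = basename_without_extension_py_alt audio_name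
instance (audio_name : Option String) (out : String) : Decidable (Spec_basename_without_extension_py audio_name out) := by unfold Spec_basename_without_extension_py; infer_instance

-- ===== CLAIM (what is proved, stated in full; the proofs are below) =====
def Claim_equal_basename_without_extension_py : Prop := ∀ (audio_name : Option String), Dom_basename_without_extension_py audio_name → Spec_basename_without_extension_py audio_name (basename_without_extension_py audio_name)

-- ===== LEMMAS AND PROOFS =====

theorem lowerChar_eq_dot {c : Char} : PySem.Chars.lowerChar c = '.' ↔ c = '.' := by
  simp only [PySem.Chars.lowerChar, PySem.Chars.isupper]
  split_ifs with h
  · simp only [Bool.and_eq_true, decide_eq_true_eq] at h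
    have h65 : 65 ≤ c.toNat := h.1
    have h90 : c.toNat ≤ 90 := h.2
    constructor
    · intro he
      have hv : (Char.ofNat (c.toNat + 32)).toNat = c.toNat + 32 := by
        rw [Char.toNat_ofNat, if_pos]
        left; omega
      rw [he] at hv
      have : ('.' : Char).toNat = 46 := rfl
      omega
    · intro he; subst he; simp at h65
  · rfl

theorem lowerChar_dot : PySem.Chars.lowerChar '.' = '.' := rfl

theorem string_eq_of_toList {s t : String} (h : s.toList = t.toList) : s = t := by
  rw [← String.ofList_toList (s := s), ← String.ofList_toList (s := t), h]

theorem suffix_iff_rev (p q : List Char) : p <:+ q ↔ p.reverse <+: q.reverse :=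
  List.reverse_prefix.symm

theorem toList_mp3 : (".mp3" : String).toList = ['.','m','p','3'] := rfl
theorem toList_wav : (".wav" : String).toList = ['.','w','a','v'] := rfl
theorem toList_ogg : (".ogg" : String).toList = ['.','o','g','g'] := rfl
theorem toList_ogm : (".ogm" : String).toList = ['.','o','g','m'] := rfl
theorem toList_m4a : (".m4a" : String).toList = ['.','m','4','a'] := rfl

/-- the common result of both ports, phrased on the REVERSED character list of the stripped name -/
def pvMspec (r : List Char) : List Char :=
  match r with
  | a :: b :: c :: d :: rest =>
    if d = '.' ∧ [PySem.Chars.lowerChar c, PySem.Chars.lowerChar b, PySem.Chars.lowerChar a] ∈ pyAudioExts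
    then rest.reverse else r.reverse
  | _ => r.reverse

theorem not_mem_exts_of_length {l : List Char} (h : l.length ≠ 3) : l ∉ pyAudioExts := by
  intro hm
  simp [pyAudioExts] at hm
  rcases hm with rfl | rfl | rfl | rfl | rfl <;> simp at h

set_option maxHeartbeats 800000 in
theorem pyExtLoop_eq (r : List Char) (raw : String) (hr : raw.toList = r.reverse) :
    pyExtLoop raw [".mp3", ".wav", ".ogg", ".ogm", ".m4a"] = String.ofList (pvMspec r) := by
  have hraw : String.ofList r.reverse = raw := by rw [← hr, String.ofList_toList]
  match r with
  | [] =>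
    rw [show pvMspec [] = [].reverse from rfl, hraw]
    simp only [pyExtLoop, PySem.Str.endswith_eq, PySem.Str.toList_lower, hr]
    norm_num [PySem.Chars.endswith_iff, PySem.Chars.lower, List.suffix_cons_iff,
      toList_mp3, toList_wav, toList_ogg, toList_ogm, toList_m4a, List.cons_ne_nil]
  | [a] =>
    rw [show pvMspec [a] = [a].reverse from rfl, hraw]
    simp only [pyExtLoop, PySem.Str.endswith_eq, PySem.Str.toList_lower, hr]
    norm_num [PySem.Chars.endswith_iff, PySem.Chars.lower, List.suffix_cons_iff,
      toList_mp3, toList_wav, toList_ogg, toList_ogm, toList_m4a, List.cons_ne_nil]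
  | [a, b] =>
    rw [show pvMspec [a, b] = [a, b].reverse from rfl, hraw]
    simp only [pyExtLoop, PySem.Str.endswith_eq, PySem.Str.toList_lower, hr]
    norm_num [PySem.Chars.endswith_iff, PySem.Chars.lower, List.suffix_cons_iff,
      toList_mp3, toList_wav, toList_ogg, toList_ogm, toList_m4a, List.cons_ne_nil]
  | [a, b, c] =>
    rw [show pvMspec [a, b, c] = [a, b, c].reverse from rfl, hraw]
    simp only [pyExtLoop, PySem.Str.endswith_eq, PySem.Str.toList_lower, hr]
    norm_num [PySem.Chars.endswith_iff, PySem.Chars.lower, List.suffix_cons_iff,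
      toList_mp3, toList_wav, toList_ogg, toList_ogm, toList_m4a, List.cons_ne_nil]
  | a :: b :: c :: d :: rest =>
    rw [pvMspec.eq_def]
    simp only []
    have hsl : ∀ sfx : String, sfx.length = 4 →
        PySem.Str.slice raw none (some (-(sfx.length : Int))) = String.ofList rest.reverse := by
      intro sfx h4
      apply string_eq_of_toList
      rw [h4]
      simp only [PySem.Str.toList_slice, PySem.Chars.slice_eq_listSlice, String.toList_ofList]
      rw [PySem.List.slice_to_neg_natCast _ 4 (by omega), hr]
      simp [List.reverse_cons, List.append_assoc]
    rw [apply_ite String.ofList, hraw]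
    simp only [pyExtLoop, PySem.Str.endswith_eq, PySem.Str.toList_lower, hr]
    rw [hsl ".mp3" rfl, hsl ".wav" rfl, hsl ".ogg" rfl, hsl ".ogm" rfl, hsl ".m4a" rfl]
    simp only [List.reverse_cons]
    simp [PySem.Chars.endswith_iff, suffix_iff_rev, toList_mp3, toList_wav, toList_ogg,
      toList_ogm, toList_m4a, PySem.Chars.lower, pyAudioExts, List.cons_prefix_cons]
    have hd : (PySem.Chars.lowerChar d = '.') ↔ d = '.' := lowerChar_eq_dot
    by_cases h1 : PySem.Chars.lowerChar a = '3' ∧ PySem.Chars.lowerChar b = 'p' ∧ PySem.Chars.lowerChar c = 'm' ∧ PySem.Chars.lowerChar d = '.'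
    · rw [if_pos ⟨h1.1.symm, h1.2.1.symm, h1.2.2.1.symm, h1.2.2.2.symm⟩,
        if_pos ⟨hd.mp h1.2.2.2, Or.inl ⟨h1.2.2.1, h1.2.1, h1.1⟩⟩]
    · rw [if_neg (fun h => h1 ⟨h.1.symm, h.2.1.symm, h.2.2.1.symm, h.2.2.2.symm⟩)]
      by_cases h2 : PySem.Chars.lowerChar a = 'v' ∧ PySem.Chars.lowerChar b = 'a' ∧ PySem.Chars.lowerChar c = 'w' ∧ PySem.Chars.lowerChar d = '.'
      · rw [if_pos ⟨h2.1.symm, h2.2.1.symm, h2.2.2.1.symm, h2.2.2.2.symm⟩,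
          if_pos ⟨hd.mp h2.2.2.2, Or.inr (Or.inl ⟨h2.2.2.1, h2.2.1, h2.1⟩)⟩]
      · rw [if_neg (fun h => h2 ⟨h.1.symm, h.2.1.symm, h.2.2.1.symm, h.2.2.2.symm⟩)]
        by_cases h3 : PySem.Chars.lowerChar a = 'g' ∧ PySem.Chars.lowerChar b = 'g' ∧ PySem.Chars.lowerChar c = 'o' ∧ PySem.Chars.lowerChar d = '.'
        · rw [if_pos ⟨h3.1.symm, h3.2.1.symm, h3.2.2.1.symm, h3.2.2.2.symm⟩,
            if_pos ⟨hd.mp h3.2.2.2, Or.inr (Or.inr (Or.inl ⟨h3.2.2.1, h3.2.1, h3.1⟩))⟩]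
        · rw [if_neg (fun h => h3 ⟨h.1.symm, h.2.1.symm, h.2.2.1.symm, h.2.2.2.symm⟩)]
          by_cases h4 : PySem.Chars.lowerChar a = 'm' ∧ PySem.Chars.lowerChar b = 'g' ∧ PySem.Chars.lowerChar c = 'o' ∧ PySem.Chars.lowerChar d = '.'
          · rw [if_pos ⟨h4.1.symm, h4.2.1.symm, h4.2.2.1.symm, h4.2.2.2.symm⟩,
              if_pos ⟨hd.mp h4.2.2.2, Or.inr (Or.inr (Or.inr (Or.inl ⟨h4.2.2.1, h4.2.1, h4.1⟩)))⟩]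
          · rw [if_neg (fun h => h4 ⟨h.1.symm, h.2.1.symm, h.2.2.1.symm, h.2.2.2.symm⟩)]
            by_cases h5 : PySem.Chars.lowerChar a = 'a' ∧ PySem.Chars.lowerChar b = '4' ∧ PySem.Chars.lowerChar c = 'm' ∧ PySem.Chars.lowerChar d = '.'
            · rw [if_pos ⟨h5.1.symm, h5.2.1.symm, h5.2.2.1.symm, h5.2.2.2.symm⟩,
                if_pos ⟨hd.mp h5.2.2.2, Or.inr (Or.inr (Or.inr (Or.inr ⟨h5.2.2.1, h5.2.1, h5.1⟩)))⟩]
            · rw [if_neg (fun h => h5 ⟨h.1.symm, h.2.1.symm, h.2.2.1.symm, h.2.2.2.symm⟩)]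
              rw [if_neg]
              rintro ⟨hdd, hor⟩
              rcases hor with ⟨p, q, s⟩ | ⟨p, q, s⟩ | ⟨p, q, s⟩ | ⟨p, q, s⟩ | ⟨p, q, s⟩
              · exact h1 ⟨s, q, p, hd.mpr hdd⟩
              · exact h2 ⟨s, q, p, hd.mpr hdd⟩
              · exact h3 ⟨s, q, p, hd.mpr hdd⟩
              · exact h4 ⟨s, q, p, hd.mpr hdd⟩
              · exact h5 ⟨s, q, p, hd.mpr hdd⟩

set_option maxHeartbeats 800000 in
theorem alt_body_eq (r : List Char) (raw : String) (hr : raw.toList = r.reverse) :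
    (match pyRPartitionDot raw.toList with
     | (stem, dot, ext) =>
       if dot = true ∧ PySem.Chars.lower ext ∈ pyAudioExts then String.ofList stem else raw)
    = String.ofList (pvMspec r) := by
  have hraw : String.ofList r.reverse = raw := by rw [← hr, String.ofList_toList]
  have hs : raw.toList.reverse = r := by rw [hr, List.reverse_reverse]
  unfold pyRPartitionDot
  rw [List.span_eq_takeWhile_dropWhile, hs]
  match r with
  | [] =>
    simp only [List.takeWhile_nil, List.dropWhile_nil]
    simpa [pvMspec] using hraw
  | [a] =>
    rw [show pvMspec [a] = [a].reverse from rfl, hraw]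
    by_cases ha : a = '.' <;>
      simp [ha, PySem.Chars.lower, pyAudioExts, lowerChar_dot]
  | [a, b] =>
    rw [show pvMspec [a, b] = [a, b].reverse from rfl, hraw]
    by_cases ha : a = '.' <;> by_cases hb : b = '.' <;>
      simp [ha, hb, PySem.Chars.lower, pyAudioExts, lowerChar_dot]
  | [a, b, c] =>
    rw [show pvMspec [a, b, c] = [a, b, c].reverse from rfl, hraw]
    by_cases ha : a = '.' <;> by_cases hb : b = '.' <;> by_cases hc : c = '.' <;>
      simp [ha, hb, hc, PySem.Chars.lower, pyAudioExts, lowerChar_dot]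
  | a :: b :: c :: d :: rest =>
    rw [pvMspec.eq_def]
    simp only []
    by_cases ha : a = '.'
    · subst ha
      simp [pyAudioExts, PySem.Chars.lower, lowerChar_dot]
      rw [← hraw]; simp
    · by_cases hb : b = '.'
      · subst hb
        simp [ha, pyAudioExts, PySem.Chars.lower, lowerChar_dot]
        rw [← hraw]; simp
      · by_cases hc : c = '.'
        · subst hc
          simp [ha, hb, pyAudioExts, PySem.Chars.lower, lowerChar_dot]
          rw [← hraw]; simp
        · by_cases hd : d = '.'
          · subst hd
            simp only [List.takeWhile_cons, List.dropWhile_cons]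
            simp [ha, hb, hc, PySem.Chars.lower, lowerChar_dot]
            by_cases hm : [PySem.Chars.lowerChar c, PySem.Chars.lowerChar b, PySem.Chars.lowerChar a] ∈ pyAudioExts
            · rw [if_pos hm, if_pos hm]
            · rw [if_neg hm, if_neg hm]
              rw [← hraw]; simp
          · have hlen : ∀ t' : List Char,
                PySem.Chars.lower (t'.reverse ++ [d, c, b, a]) ∉ pyAudioExts := by
              intro t'
              apply not_mem_exts_of_length
              simp [PySem.Chars.lower]
            rcases hrest : rest.dropWhile (fun c => !(c == '.')) with _ | ⟨u, us⟩ <;>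
              simp [ha, hb, hc, hd, hrest, hlen] <;>
              (rw [← hraw]; simp)

-- ===== VERDICT (by name: the statement is the Claim_ definition above) =====
theorem basename_without_extension_py_spec : Claim_equal_basename_without_extension_py := by
  intro audio_name _
  unfold Spec_basename_without_extension_py
  unfold basename_without_extension_py basename_without_extension_py_alt
  set raw := PySem.Str.strip (audio_name.getD "") with hraw
  have hr : raw.toList = raw.toList.reverse.reverse := by simp
  rw [alt_body_eq raw.toList.reverse raw hr]
  show (if raw = "" then "" else pyExtLoop raw [".mp3", ".wav", ".ogg", ".ogm", ".m4a"]) = _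
  by_cases h0 : raw = ""
  · rw [if_pos h0, h0]
    simp [pvMspec]
  · rw [if_neg h0, pyExtLoop_eq raw.toList.reverse raw hr]
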